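-- pv_equiv track=rewrite | github.com/yeeeengyu/market_audition | app/ocr.py | _dedup_adjacent_lines
-- ===== SOURCE A (Python) =====
-- def _dedup_adjacent_lines(text: str) -> str:
--     lines = [ln.strip() for ln in (text or "").splitlines()]
--     out = []
--     prev = None
--     for ln in lines:
--         if not ln:
--             continue
--         if ln == prev:
--             continue
--         out.append(ln)
--         prev = ln
--     return "\n".join(out)
-- ===== SOURCE B (Python) =====
-- def _dedup_adjacent_lines(text: str) -> str:
--     lines = [ln for ln in (raw.strip() for raw in (text or "").splitlines()) if ln]
--
--     def run_heads(ls):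
--         if not ls:
--             return []
--         h = ls[0]
--         i = 1
--         while i < len(ls) and ls[i] == h:
--             i += 1
--         return [h] + run_heads(ls[i:])
--
--     return "\n".join(run_heads(lines))
-- ===== Notes on version B (the rewrite author's own statement) =====
-- stated objective: alternative
-- what changed: Replaces A's single pass with a prev sentinel and skip-continues by a two-stage run decomposition: first filter out blank stripped lines, then a groupby-style recursion that at each step emits the head of the maximal run of equal lines and drops the whole run before recursing (no prev state, no accumulator).
import Mathlib
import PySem

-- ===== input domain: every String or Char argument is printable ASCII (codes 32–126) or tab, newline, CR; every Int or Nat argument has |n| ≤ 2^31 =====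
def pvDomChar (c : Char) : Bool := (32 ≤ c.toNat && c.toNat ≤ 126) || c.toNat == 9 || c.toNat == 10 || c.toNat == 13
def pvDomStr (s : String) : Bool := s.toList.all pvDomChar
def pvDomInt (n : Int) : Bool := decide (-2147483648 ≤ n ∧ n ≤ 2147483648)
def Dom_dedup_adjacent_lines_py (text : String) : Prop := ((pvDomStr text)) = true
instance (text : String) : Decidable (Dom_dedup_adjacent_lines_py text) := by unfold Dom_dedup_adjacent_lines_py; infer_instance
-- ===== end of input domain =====

-- B replaces A's prev-sentinel single pass by a two-stage run decomposition: filter blank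
-- stripped lines, then a groupby-style recursion emitting each maximal run's head and dropping
-- the whole run (objective: alternative, same cost).

-- ===== PORT A =====
-- the for-loop of A, carrying the same state (out, prev); prev = None ↦ none
def dedupLoopA : List String → List String → Option String → List String
  | [], out, _ => out
  | ln :: rest, out, prev =>
    if ln == "" then dedupLoopA rest out prev
    else if some ln == prev then dedupLoopA rest out prev
    else dedupLoopA rest (out ++ [ln]) (some ln)

def dedup_adjacent_lines_py (text : String) : String :=
  let lines := (PySem.Str.splitlines (if text == "" then "" else text)).map PySem.Str.strip
  PySem.Str.join "\n" (dedupLoopA lines [] none)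

-- ===== PORT B =====
-- run_heads: the while loop that advances past the run of lines equal to the head is
-- List.dropWhile (· == h); then emit h and recurse on the remainder.
def runHeads : List String → List String
  | [] => []
  | h :: t => h :: runHeads (t.dropWhile (· == h))
termination_by ls => ls.length
decreasing_by
  have := List.length_dropWhile_le (· == h) t
  simp at *; omega

def dedup_adjacent_lines_py_alt (text : String) : String :=
  let ls := ((PySem.Str.splitlines (if text == "" then "" else text)).map PySem.Str.strip).filter
      (fun ln => !(ln == ""))
  PySem.Str.join "\n" (runHeads ls)

-- ===== PRECONDITION & SPEC =====
def Spec_dedup_adjacent_lines_py (text : String) (out : String) : Prop := out = dedup_adjacent_lines_py_alt text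
instance (text : String) (out : String) : Decidable (Spec_dedup_adjacent_lines_py text out) := by unfold Spec_dedup_adjacent_lines_py; infer_instance

-- ===== CLAIM =====
def Claim_equal_dedup_adjacent_lines_py : Prop := ∀ (text : String), Dom_dedup_adjacent_lines_py text → Spec_dedup_adjacent_lines_py text (dedup_adjacent_lines_py text)

-- ===== LEMMAS AND PROOFS =====

-- characterisation of A's loop value: adjacent dedup of the nonempty lines relative to prev
def sel : List String → Option String → List String
  | [], _ => []
  | a :: rest, p => if some a == p then sel rest p else a :: sel rest (some a)

lemma dedupLoopA_eq_sel (lines : List String) :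
    ∀ (out : List String) (prev : Option String),
      dedupLoopA lines out prev = out ++ sel (lines.filter (fun ln => !(ln == ""))) prev := by
  induction lines with
  | nil => intro out prev; simp [dedupLoopA, sel]
  | cons ln rest ih =>
    intro out prev
    by_cases h : ln = ""
    · subst h; simp [dedupLoopA, ih]
    · have hne : (ln == "") = false := by simp [h]
      by_cases hp : some ln = prev
      · simp [dedupLoopA, hne, hp, sel, ih]
      · simp [dedupLoopA, hne, hp, sel, ih]

lemma sel_some_eq_runHeads_dropWhile (xs : List String) :
    ∀ (h : String), sel xs (some h) = runHeads (xs.dropWhile (· == h)) := by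
  induction xs with
  | nil => intro h; simp [sel, runHeads]
  | cons a rest ih =>
    intro h
    by_cases hah : a = h
    · subst hah; simp [sel, List.dropWhile, ih]
    · have hb : (a == h) = false := by simp [hah]
      simp [sel, List.dropWhile, hb, runHeads, ih]

lemma sel_none_eq_runHeads (xs : List String) : sel xs none = runHeads xs := by
  cases xs with
  | nil => simp [sel, runHeads]
  | cons a rest => simp [sel, runHeads, sel_some_eq_runHeads_dropWhile]

-- ===== VERDICT =====
theorem dedup_adjacent_lines_py_spec : Claim_equal_dedup_adjacent_lines_py := by
  intro text _
  unfold Spec_dedup_adjacent_lines_py dedup_adjacent_lines_py dedup_adjacent_lines_py_alt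
  simp only [dedupLoopA_eq_sel, sel_none_eq_runHeads, List.nil_append]
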